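-- pv_equiv track=rewrite | github.com/james-sungjae-lee/2018_DigitalLogicDesign | RegularExpressionFSM/PythonTest/test7.py | stateXY
-- ===== SOURCE A (Python) =====
-- def stateXY(regex):
--     if not regex:
--         return 0
--     token = regex[0]
--
--     if token == 'x':
--         regex = regex[1:]
--         return stateXY(regex)
--     elif token == 'y':
--         regex = regex[1:]
--         return stateAB(regex)
--     else:
--         return 0
--
-- def stateAB(regex):
--     if not regex:
--         return 0
--     token = regex[0]
--
--     if token == 'a':
--         regex = regex[1:]
--         return stateAB(regex)
--     elif token == 'b':
--         regex = regex[1:]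
--         return stateB(regex)
--     else:
--         return 0
--
-- def stateB(regex):
--     if regex:
--         return 0
--     else:
--         return 1
-- ===== SOURCE B (Python) =====
-- def stateXY(regex):
--     i = 0
--     n = len(regex)
--     while i < n and regex[i] == 'x':
--         i += 1
--     if i >= n or regex[i] != 'y':
--         return 0
--     i += 1
--     while i < n and regex[i] == 'a':
--         i += 1
--     if i >= n or regex[i] != 'b':
--         return 0
--     return 1 if i + 1 == n else 0
-- ===== Notes on version B (the rewrite author's own statement) =====
-- stated objective: alternative
-- what changed: Replaces the mutually recursive functions that re-slice the string at every step with a single iterative index scan (skip x's, require y, skip a's, require trailing b); the quadratic slicing cost only shows on long matching prefixes, so no speed-up was measured.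
import Mathlib
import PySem

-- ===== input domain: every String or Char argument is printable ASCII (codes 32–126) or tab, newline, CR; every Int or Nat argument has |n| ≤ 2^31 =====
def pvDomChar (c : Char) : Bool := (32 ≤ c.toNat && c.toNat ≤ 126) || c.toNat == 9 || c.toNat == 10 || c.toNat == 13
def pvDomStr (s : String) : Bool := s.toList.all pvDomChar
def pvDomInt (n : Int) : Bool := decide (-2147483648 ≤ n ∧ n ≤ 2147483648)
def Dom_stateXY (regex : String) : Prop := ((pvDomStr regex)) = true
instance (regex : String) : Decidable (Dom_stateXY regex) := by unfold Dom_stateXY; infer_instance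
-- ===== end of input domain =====

-- B replaces A's mutually recursive string-slicing FSM with a single linear index scan (alternative structure; no measured speed difference).


-- ===== PORT A =====
-- mutual recursion on the character list, one state per Python function
def pvStateB (l : List Char) : Int :=
  match l with
  | [] => 1
  | _ :: _ => 0

def pvStateAB (l : List Char) : Int :=
  match l with
  | [] => 0
  | c :: rest =>
    if c = 'a' then pvStateAB rest
    else if c = 'b' then pvStateB rest
    else 0

def pvStateXY (l : List Char) : Int :=
  match l with
  | [] => 0
  | c :: rest =>
    if c = 'x' then pvStateXY rest
    else if c = 'y' then pvStateAB rest
    else 0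

def stateXY (regex : String) : Int := pvStateXY regex.toList

-- ===== PORT B =====
-- B's while-loops skipping 'x' / 'a' become dropWhile; the remaining checks are the two matches
def stateXY_alt (regex : String) : Int :=
  match (regex.toList.dropWhile (· == 'x')) with
  | 'y' :: rest =>
    match rest.dropWhile (· == 'a') with
    | ['b'] => 1
    | _ => 0
  | _ => 0

-- ===== PRECONDITION & SPEC =====
def Spec_stateXY (regex : String) (out : Int) : Prop := out = stateXY_alt regex
instance (regex : String) (out : Int) : Decidable (Spec_stateXY regex out) := by unfold Spec_stateXY; infer_instance

-- ===== CLAIM (what is proved, stated in full; the proofs are below) =====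
def Claim_equal_stateXY : Prop := ∀ (regex : String), Dom_stateXY regex → Spec_stateXY regex (stateXY regex)

-- ===== LEMMAS AND PROOFS =====
theorem pvStateAB_eq (l : List Char) :
    pvStateAB l = (match l.dropWhile (· == 'a') with | ['b'] => 1 | _ => 0) := by
  induction l with
  | nil => simp [pvStateAB]
  | cons c rest ih =>
    by_cases h : c = 'a'
    · subst h; simpa [pvStateAB, List.dropWhile] using ih
    · have ha : (c == 'a') = false := by simp [h]
      simp only [pvStateAB, List.dropWhile, ha, if_neg h]
      by_cases hb : c = 'b'
      · subst hb; cases rest <;> simp [pvStateB]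
      · have : (c :: rest ≠ ['b']) := by simp [hb]
        split
        · simp_all
        · split <;> simp_all

theorem pvStateXY_eq (l : List Char) :
    pvStateXY l = (match l.dropWhile (· == 'x') with
      | 'y' :: rest => (match rest.dropWhile (· == 'a') with | ['b'] => 1 | _ => 0)
      | _ => 0) := by
  induction l with
  | nil => simp [pvStateXY]
  | cons c rest ih =>
    by_cases h : c = 'x'
    · subst h; simpa [pvStateXY, List.dropWhile] using ih
    · have hx : (c == 'x') = false := by simp [h]
      simp only [pvStateXY, List.dropWhile, hx, if_neg h]
      by_cases hy : c = 'y'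
      · subst hy; simp [pvStateAB_eq]
      · split
        · simp_all
        · split <;> simp_all

-- ===== VERDICT (by name: the statement is the Claim_ definition above) =====
theorem stateXY_spec : Claim_equal_stateXY := by
  intro regex _
  unfold Spec_stateXY stateXY stateXY_alt
  exact pvStateXY_eq regex.toList
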